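-- pv_equiv track=rewrite | github.com/k-harada/AtCoder | ADT/20231017/D.py | solve
-- ===== SOURCE A (Python) =====
-- def solve(n, a, b):
--     res = []
--     res_a = ""
--     res_b = ""
--     for i in range(n):
--         if i % 2 == 0:
--             res_a = res_a + "." * b
--             res_b = res_b + "#" * b
--         else:
--             res_a = res_a + "#" * b
--             res_b = res_b + "." * b
--     for i in range(n):
--         if i % 2 == 0:
--             for _ in range(a):
--                 res.append(res_a)
--         else:
--             for _ in range(a):
--                 res.append(res_b)
--     return res
-- ===== SOURCE B (Python) =====
-- def solve(n, a, b):
--     if n <= 0: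
--         return []
--     pat = ("." * b + "#" * b) * (n // 2 + 1)
--     rows = (pat[:n * b], pat[b:(n + 1) * b])
--     return [rows[i % 2] for i in range(n) for _ in range(a)]
-- ===== Notes on version B (the rewrite author's own statement) =====
-- stated objective: alternative
-- what changed: Instead of growing the two template strings by repeated concatenation in a parity-branching loop, B tiles one doubled block pattern ('.'*b + '#'*b) * (n//2 + 1) and slices the two distinct rows out of it, then emits rows[i % 2] a times per block row.
import Mathlib
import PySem

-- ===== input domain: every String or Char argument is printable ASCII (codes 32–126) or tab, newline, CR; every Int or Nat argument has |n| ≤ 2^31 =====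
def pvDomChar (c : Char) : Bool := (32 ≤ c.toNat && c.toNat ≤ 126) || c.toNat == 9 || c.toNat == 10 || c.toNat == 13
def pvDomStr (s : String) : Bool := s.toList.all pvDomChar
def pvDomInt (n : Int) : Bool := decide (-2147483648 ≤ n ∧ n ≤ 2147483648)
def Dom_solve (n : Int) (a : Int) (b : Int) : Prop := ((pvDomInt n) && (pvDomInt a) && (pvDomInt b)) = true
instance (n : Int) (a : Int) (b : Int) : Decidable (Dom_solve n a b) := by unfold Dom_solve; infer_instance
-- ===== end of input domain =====

-- B drops A's incremental template-string concatenation loop: it tiles one doubled '.'/'#' block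
-- pattern and slices the two distinct rows out of it (objective: alternative).

-- ===== PORT A =====
-- A builds res_a/res_b by repeated concatenation over range(n), then appends a copies per block row.
def solve (n : Int) (a : Int) (b : Int) : List String :=
  let tpl : List Char × List Char :=
    (PySem.List.pyRange 0 n 1).foldl
      (fun (p : List Char × List Char) i =>
        if PySem.Int.mod i 2 = 0 then
          (p.1 ++ PySem.List.pyRepeat ['.'] b, p.2 ++ PySem.List.pyRepeat ['#'] b)
        else
          (p.1 ++ PySem.List.pyRepeat ['#'] b, p.2 ++ PySem.List.pyRepeat ['.'] b))
      ([], [])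
  (PySem.List.pyRange 0 n 1).foldl
    (fun res i =>
      if PySem.Int.mod i 2 = 0 then
        (PySem.List.pyRange 0 a 1).foldl (fun r _ => r ++ [String.ofList tpl.1]) res
      else
        (PySem.List.pyRange 0 a 1).foldl (fun r _ => r ++ [String.ofList tpl.2]) res)
    []

-- ===== PORT B =====
-- B: pat = ('.'*b + '#'*b) * (n//2 + 1); rows = (pat[:n*b], pat[b:(n+1)*b]);
-- [rows[i % 2] for i in range(n) for _ in range(a)]  (rows[i % 2]: first component when i % 2 == 0)
def solve_alt (n : Int) (a : Int) (b : Int) : List String :=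
  if n ≤ 0 then []
  else
    let pat : List Char :=
      PySem.List.pyRepeat (PySem.List.pyRepeat ['.'] b ++ PySem.List.pyRepeat ['#'] b)
        (PySem.Int.floordiv n 2 + 1)
    let rows : List Char × List Char :=
      (PySem.List.slice pat none (some (n * b)),
       PySem.List.slice pat (some b) (some ((n + 1) * b)))
    (PySem.List.pyRange 0 n 1).flatMap (fun i =>
      (PySem.List.pyRange 0 a 1).map (fun _ =>
        String.ofList (if PySem.Int.mod i 2 ≠ 0 then rows.2 else rows.1)))

-- ===== PRECONDITION & SPEC =====
def Spec_solve (n : Int) (a : Int) (b : Int) (out : List String) : Prop := out = solve_alt n a b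
instance (n : Int) (a : Int) (b : Int) (out : List String) : Decidable (Spec_solve n a b out) := by unfold Spec_solve; infer_instance

-- ===== CLAIM (what is proved, stated in full; the proofs are below) =====
def Claim_equal_solve : Prop := ∀ (n : Int) (a : Int) (b : Int), Dom_solve n a b → Spec_solve n a b (solve n a b)

-- ===== LEMMAS AND PROOFS =====

-- row of n parity blocks, b wide, starting at block parity par
def pvRow (b : Int) (m : Nat) (par : Nat) : List Char :=
  ((List.range m).map (fun j =>
    if (par + j) % 2 = 0 then PySem.List.pyRepeat ['.'] b else PySem.List.pyRepeat ['#'] b)).flatten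

lemma pvRow_split (b : Int) (m d par : Nat) :
    pvRow b (m + d) par = pvRow b m par ++ pvRow b d (par + m) := by
  unfold pvRow
  rw [List.range_add, List.map_append, List.flatten_append, List.map_map]
  congr 2
  refine List.map_congr_left (fun j _ => ?_)
  simp only [Function.comp_apply]
  have h : par + (m + j) = par + m + j := by omega
  rw [h]

lemma pvRow_one (b : Int) (par : Nat) :
    pvRow b 1 par = if par % 2 = 0 then PySem.List.pyRepeat ['.'] b else PySem.List.pyRepeat ['#'] b := by
  unfold pvRow
  simp

lemma pvRow_length (b : Int) (m par : Nat) : (pvRow b m par).length = m * b.toNat := by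
  induction m generalizing par with
  | zero => simp [pvRow]
  | succ m ih =>
    have h := pvRow_split b m 1 par
    rw [show m + 1 = m + 1 from rfl, h, List.length_append, ih, pvRow_one]
    split_ifs <;> simp [PySem.List.pyRepeat_singleton] <;> ring

lemma pvRow_nil (b : Int) (hb : b ≤ 0) (m par : Nat) : pvRow b m par = [] := by
  have h0 : b.toNat = 0 := Int.toNat_of_nonpos hb
  have := pvRow_length b m par
  rw [h0, Nat.mul_zero] at this
  exact List.eq_nil_of_length_eq_zero this

lemma pvPat (b : Int) (K : Nat) :
    (List.replicate K (PySem.List.pyRepeat ['.'] b ++ PySem.List.pyRepeat ['#'] b)).flatten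
      = pvRow b (2 * K) 0 := by
  induction K with
  | zero => simp [pvRow]
  | succ K ih =>
    rw [List.replicate_succ', List.flatten_append, ih]
    have h2 : 2 * (K + 1) = 2 * K + 2 := by ring
    rw [h2, pvRow_split b (2 * K) 2 0]
    congr 1
    have h21 : (2 : Nat) = 1 + 1 := rfl
    rw [h21, pvRow_split b 1 1 (0 + 2 * K), pvRow_one, pvRow_one]
    have e0 : (0 + 2 * K) % 2 = 0 := by omega
    have e1 : (0 + 2 * K + 1) % 2 = 1 := by omega
    rw [e0, e1]
    simp

-- the two sliced rows of B are exactly A's two templates (positive n)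
lemma pvRows_eq (n b : Int) (hn : 0 < n) :
    (PySem.List.slice
        (PySem.List.pyRepeat (PySem.List.pyRepeat ['.'] b ++ PySem.List.pyRepeat ['#'] b)
          (PySem.Int.floordiv n 2 + 1)) none (some (n * b)) = pvRow b n.toNat 0) ∧
    (PySem.List.slice
        (PySem.List.pyRepeat (PySem.List.pyRepeat ['.'] b ++ PySem.List.pyRepeat ['#'] b)
          (PySem.Int.floordiv n 2 + 1)) (some b) (some ((n + 1) * b)) = pvRow b n.toNat 1) := by
  have hfd : PySem.Int.floordiv n 2 = n / 2 := PySem.Int.floordiv_eq_ediv_of_pos (by omega)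
  have hpat : PySem.List.pyRepeat (PySem.List.pyRepeat ['.'] b ++ PySem.List.pyRepeat ['#'] b)
      (PySem.Int.floordiv n 2 + 1)
      = pvRow b (2 * (PySem.Int.floordiv n 2 + 1).toNat) 0 := by
    rw [show PySem.List.pyRepeat (PySem.List.pyRepeat ['.'] b ++ PySem.List.pyRepeat ['#'] b)
        (PySem.Int.floordiv n 2 + 1)
        = (List.replicate (PySem.Int.floordiv n 2 + 1).toNat
            (PySem.List.pyRepeat ['.'] b ++ PySem.List.pyRepeat ['#'] b)).flatten from rfl]
    exact pvPat b _
  set M : Nat := 2 * (PySem.Int.floordiv n 2 + 1).toNat with hM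
  have hNM : n.toNat + 1 ≤ M := by rw [hM, hfd]; omega
  by_cases hb : b ≤ 0
  · -- b ≤ 0: every row and the whole pattern are empty
    have hpn : pvRow b M 0 = [] := pvRow_nil b hb M 0
    rw [hpat, hpn] at *
    constructor <;>
      simp [pvRow_nil b hb, PySem.List.slice]
  · -- b > 0
    have hb2 : (0 : Int) < b := by omega
    have hb' : (0 : Int) ≤ b := le_of_lt hb2
    have hnb : (0 : Int) ≤ n * b := by positivity
    have e1 : n = (n.toNat : Int) := (Int.toNat_of_nonneg (le_of_lt hn)).symm
    have e2 : b = (b.toNat : Int) := (Int.toNat_of_nonneg hb').symm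
    have htn : (n * b).toNat = n.toNat * b.toNat := by
      conv_lhs => rw [e1, e2]
      rw [← Nat.cast_mul, Int.toNat_natCast]
    constructor
    · rw [PySem.List.slice_to _ hnb, hpat, htn]
      rw [show M = n.toNat + (M - n.toNat) from by omega, pvRow_split b n.toNat (M - n.toNat) 0]
      rw [List.take_append_of_le_length (by rw [pvRow_length])]
      rw [← pvRow_length b n.toNat 0, List.take_length]
    · have hnb1 : (0 : Int) ≤ (n + 1) * b := by positivity
      rw [PySem.List.slice_toNat _ hb' hnb1, hpat]
      have ht1 : ((n + 1) * b).toNat = (n.toNat + 1) * b.toNat := by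
        conv_lhs => rw [e1, e2]
        rw [show ((n.toNat : Int) + 1) = ((n.toNat + 1 : Nat) : Int) from by push_cast; ring,
          ← Nat.cast_mul, Int.toNat_natCast]
      have harg : (n.toNat + 1) * b.toNat - b.toNat = n.toNat * b.toNat := by
        rw [Nat.succ_mul]; omega
      rw [ht1, harg]
      rw [show M = 1 + (M - 1) from by omega, pvRow_split b 1 (M - 1) 0]
      have hlen1 : (pvRow b 1 0).length = b.toNat := by rw [pvRow_length]; omega
      have hdrop2 : List.drop b.toNat (pvRow b 1 0 ++ pvRow b (M - 1) (0 + 1))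
          = pvRow b (M - 1) (0 + 1) := by
        rw [← hlen1, List.drop_left]
      rw [hdrop2]
      rw [show M - 1 = n.toNat + (M - 1 - n.toNat) from by omega,
        pvRow_split b n.toNat (M - 1 - n.toNat) (0 + 1)]
      rw [List.take_append_of_le_length (by rw [pvRow_length])]
      rw [show (0 + 1 : Nat) = 1 from rfl, ← pvRow_length b n.toNat 1, List.take_length]

lemma pvFold1 (b : Int) (m : Nat) (x y : List Char) :
    ((List.range m).map (fun (k : Nat) => (0 : Int) + (k : Int))).foldl
      (fun (p : List Char × List Char) i =>
        if PySem.Int.mod i 2 = 0 then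
          (p.1 ++ PySem.List.pyRepeat ['.'] b, p.2 ++ PySem.List.pyRepeat ['#'] b)
        else
          (p.1 ++ PySem.List.pyRepeat ['#'] b, p.2 ++ PySem.List.pyRepeat ['.'] b))
      (x, y)
    = (x ++ pvRow b m 0, y ++ pvRow b m 1) := by
  induction m with
  | zero => simp [pvRow]
  | succ m ih =>
    rw [List.range_succ, List.map_append, List.foldl_append, ih]
    have hm : PySem.Int.mod ((0 : Int) + (m : Int)) 2 = ((m % 2 : Nat) : Int) := by
      rw [zero_add]; exact_mod_cast PySem.Int.mod_natCast m 2
    have hrow0 : pvRow b (m + 1) 0 = pvRow b m 0 ++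
        (if m % 2 = 0 then PySem.List.pyRepeat ['.'] b else PySem.List.pyRepeat ['#'] b) := by
      rw [pvRow_split b m 1 0, pvRow_one]
      simp
    have hrow1 : pvRow b (m + 1) 1 = pvRow b m 1 ++
        (if m % 2 = 0 then PySem.List.pyRepeat ['#'] b else PySem.List.pyRepeat ['.'] b) := by
      rw [pvRow_split b m 1 1, pvRow_one]
      rcases Nat.even_or_odd m with h | h
      · have h0 := Nat.even_iff.mp h
        have h2 : (1 + m) % 2 = 1 := by omega
        simp [h0, h2]
      · have h1 := Nat.odd_iff.mp h
        have h2 : (1 + m) % 2 = 0 := by omega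
        simp [h1, h2]
    simp only [List.map_cons, List.map_nil, List.foldl_cons, List.foldl_nil, hm]
    rcases Nat.even_or_odd m with h | h
    · have h0 : m % 2 = 0 := Nat.even_iff.mp h
      simp only [h0, hrow0, hrow1, Nat.cast_zero, if_pos]
      simp
    · have h1 : m % 2 = 1 := Nat.odd_iff.mp h
      simp only [h1, hrow0, hrow1, Nat.cast_one]
      norm_num

-- ===== VERDICT (by name: the statement is the Claim_ definition above) =====
theorem solve_spec : Claim_equal_solve := by
  intro n a b _
  unfold Spec_solve solve solve_alt
  dsimp only
  by_cases hn : n ≤ 0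
  case pos =>
    rw [if_pos hn, PySem.List.pyRange_one 0 n]
    simp only [sub_zero]
    rw [Int.toNat_of_nonpos hn]
    simp
  case neg =>
    rw [if_neg hn]
    replace hn : 0 < n := by omega
    obtain ⟨h1, h2⟩ := pvRows_eq n b hn
    rw [h1, h2, PySem.List.pyRange_one 0 n]
    simp only [sub_zero]
    rw [pvFold1 b n.toNat [] []]
    simp only [List.nil_append]
    have hinner : ∀ (s : String) (res : List String),
        (PySem.List.pyRange 0 a 1).foldl (fun r _ => r ++ [s]) res
          = res ++ (PySem.List.pyRange 0 a 1).map (fun _ => s) := fun s res =>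
      PySem.List.foldl_append_singleton_eq_map (fun _ => s) _ res
    calc ((List.range n.toNat).map (fun (k : Nat) => (0 : Int) + (k : Int))).foldl
          (fun res i =>
            if PySem.Int.mod i 2 = 0 then
              (PySem.List.pyRange 0 a 1).foldl (fun r _ => r ++ [String.ofList (pvRow b n.toNat 0)]) res
            else
              (PySem.List.pyRange 0 a 1).foldl (fun r _ => r ++ [String.ofList (pvRow b n.toNat 1)]) res) []
        = ((List.range n.toNat).map (fun (k : Nat) => (0 : Int) + (k : Int))).foldl
          (fun res i => res ++ (PySem.List.pyRange 0 a 1).map (fun _ =>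
              if PySem.Int.mod i 2 = 0 then String.ofList (pvRow b n.toNat 0)
              else String.ofList (pvRow b n.toNat 1))) [] := by
          congr 1
          funext res i
          by_cases h : PySem.Int.mod i 2 = 0
          · rw [if_pos h, hinner]
            have : (fun (_ : Int) =>
                if PySem.Int.mod i 2 = 0 then String.ofList (pvRow b n.toNat 0)
                else String.ofList (pvRow b n.toNat 1)) = (fun _ => String.ofList (pvRow b n.toNat 0)) := by
              funext _; rw [if_pos h]
            rw [this]
          · rw [if_neg h, hinner]
            have : (fun (_ : Int) =>
                if PySem.Int.mod i 2 = 0 then String.ofList (pvRow b n.toNat 0)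
                else String.ofList (pvRow b n.toNat 1)) = (fun _ => String.ofList (pvRow b n.toNat 1)) := by
              funext _; rw [if_neg h]
            rw [this]
      _ = ((List.range n.toNat).map (fun (k : Nat) => (0 : Int) + (k : Int))).flatMap
          (fun i => (PySem.List.pyRange 0 a 1).map (fun _ =>
              if PySem.Int.mod i 2 = 0 then String.ofList (pvRow b n.toNat 0)
              else String.ofList (pvRow b n.toNat 1))) := by
          rw [PySem.List.foldl_append_eq_flatMap]; simp
      _ = _ := by
          refine List.flatMap_congr (fun i _ => ?_)
          refine List.map_congr_left (fun _ _ => ?_)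
          by_cases h : PySem.Int.mod i 2 = 0
          · rw [if_pos h, if_neg (not_not_intro h)]
          · rw [if_neg h, if_pos h]
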